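-- pv_equiv track=rewrite | github.com/pborenstein/obsidian-tag-tools | tagex/core/operations/add_tags.py | _add_tags_field
-- ===== SOURCE A (Python) =====
-- from typing import List, Dict, Any
--
-- def _add_tags_field(yaml_content: str, tags: List[str]) -> str:
--     """
--     Add tags field to YAML that doesn't have one.
--
--     Also handles removing duplicate tags: fields if they exist.
--
--     Args:
--         yaml_content: Current YAML content
--         tags: Tags to add
--
--     Returns:
--         Updated YAML content with tags field
--     """
--     # Check for and remove any existing duplicate tags: fields
--     # (This shouldn't normally happen, but handles edge cases)
--     lines = yaml_content.split('\n')
--     filtered_lines = []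
--     i = 0
--
--     while i < len(lines):
--         line = lines[i]
--         stripped = line.strip()
--
--         # Skip any existing tags: or tag: fields (duplicates)
--         if stripped.startswith('tags:') or stripped.startswith('tag:'):
--             value_part = line.split(':', 1)[1].strip() if len(line.split(':', 1)) > 1 else ''
--             if not value_part:
--                 # Multi-line format - skip array items
--                 i += 1
--                 while i < len(lines) and (lines[i].strip().startswith('- ') or lines[i].strip() == ''):
--                     i += 1
--                 i -= 1  # Back up since we'll increment at end of loop
--             # If inline format, just skip the line
--         else:
--             filtered_lines.append(line)
--
--         i += 1
--
--     # Add tags field at the end of YAML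
--     tags_line = f"tags: [{', '.join(tags)}]"
--
--     cleaned_yaml = '\n'.join(filtered_lines)
--     if cleaned_yaml.strip():
--         # Existing YAML - append tags field
--         return f"{cleaned_yaml}\n{tags_line}"
--     else:
--         # Empty YAML - just add tags
--         return tags_line
-- ===== SOURCE B (Python) =====
-- def _add_tags_field(yaml_content, tags):
--     """Single forward pass with a skip flag instead of index stepping with back-up."""
--     kept = []
--     skipping = False
--     for line in yaml_content.split('\n'):
--         stripped = line.strip()
--         if skipping:
--             if stripped.startswith('- ') or stripped == '':
--                 continue
--             skipping = False
--         if stripped.startswith('tags:') or stripped.startswith('tag:'):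
--             if line.split(':', 1)[1].strip():
--                 continue            # inline list: drop just this line
--             skipping = True         # block list: drop header and following items
--             continue
--         kept.append(line)
--     cleaned = '\n'.join(kept)
--     tags_line = "tags: [" + ", ".join(tags) + "]"
--     return cleaned + "\n" + tags_line if cleaned.strip() else tags_line
-- ===== Notes on version B (the rewrite author's own statement) =====
-- stated objective: simpler
-- what changed: Replaces A's index-stepping while-loop with a nested skip loop and an i -= 1 back-up by a single forward for-loop over the lines that carries a boolean skip flag (a fold), re-dispatching the line that ends a skipped block normally.
import Mathlib
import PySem

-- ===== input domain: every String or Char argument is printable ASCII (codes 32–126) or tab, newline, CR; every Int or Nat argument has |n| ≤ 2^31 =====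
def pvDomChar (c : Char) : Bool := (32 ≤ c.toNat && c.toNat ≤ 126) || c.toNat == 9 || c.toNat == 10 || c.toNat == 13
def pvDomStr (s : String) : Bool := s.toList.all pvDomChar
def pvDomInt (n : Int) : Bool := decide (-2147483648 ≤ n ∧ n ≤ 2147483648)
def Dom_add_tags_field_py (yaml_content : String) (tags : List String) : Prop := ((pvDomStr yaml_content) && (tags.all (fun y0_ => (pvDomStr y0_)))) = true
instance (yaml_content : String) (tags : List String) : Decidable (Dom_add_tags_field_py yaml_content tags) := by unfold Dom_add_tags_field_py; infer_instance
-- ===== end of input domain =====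

-- B replaces A's index-stepping while-loop (with its i -= 1 back-up) by a single
-- forward pass carrying a boolean skip flag; same return value, simpler control flow.

-- ===== PORT A =====
-- inner while loop: advance i past '- ' items and blank lines
def pvA_inner (lines : List String) (i : Nat) : Nat :=
  if h : i < lines.length then
    if PySem.Str.startswith (PySem.Str.strip lines[i]) "- " || PySem.Str.strip lines[i] == "" then
      pvA_inner lines (i + 1)
    else i
  else i
termination_by lines.length - i

-- needed by pvA_outer's termination proof
theorem pvA_inner_ge (lines : List String) (i : Nat) : i ≤ pvA_inner lines i := by
  induction i using pvA_inner.induct (lines := lines) with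
  | case1 i h hc ih =>
      conv_rhs => rw [pvA_inner]
      rw [dif_pos h, if_pos hc]; omega
  | case2 i h hc =>
      conv_rhs => rw [pvA_inner]
      rw [dif_pos h, if_neg hc]
  | case3 i h =>
      conv_rhs => rw [pvA_inner]
      rw [dif_neg h]

-- outer while loop of A, index i and accumulator filtered_lines
def pvA_outer (lines : List String) (i : Nat) (acc : List String) : List String :=
  if h : i < lines.length then
    let line := lines[i]
    let stripped := PySem.Str.strip line
    if PySem.Str.startswith stripped "tags:" || PySem.Str.startswith stripped "tag:" then
      let parts := (PySem.Str.splitMax? line ":" 1).getD []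
      let value_part := if 1 < parts.length then PySem.Str.strip (parts.getD 1 "") else ""
      if value_part == "" then
        -- i += 1; inner skip; i -= 1; i += 1  ⇒ next index is (inner (i+1) - 1) + 1
        pvA_outer lines (pvA_inner lines (i + 1) - 1 + 1) acc
      else
        pvA_outer lines (i + 1) acc
    else
      pvA_outer lines (i + 1) (acc ++ [line])
  else acc
termination_by lines.length - i
decreasing_by
  · have := pvA_inner_ge lines (i + 1); omega
  · omega
  · omega

def add_tags_field_py (yaml_content : String) (tags : List String) : String :=
  let lines := (PySem.Str.split? yaml_content "\n").getD []
  let filtered_lines := pvA_outer lines 0 []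
  let tags_line := "tags: [" ++ PySem.Str.join ", " tags ++ "]"
  let cleaned_yaml := PySem.Str.join "\n" filtered_lines
  if PySem.Str.strip cleaned_yaml ≠ "" then cleaned_yaml ++ "\n" ++ tags_line
  else tags_line

-- ===== PORT B =====
-- one step of B's for-loop; state = (skipping flag, kept lines)
def pvB_step (st : Bool × List String) (line : String) : Bool × List String :=
  let stripped := PySem.Str.strip line
  if st.1 && (PySem.Str.startswith stripped "- " || stripped == "") then
    st
  else if PySem.Str.startswith stripped "tags:" || PySem.Str.startswith stripped "tag:" then
    if PySem.Str.strip (((PySem.Str.splitMax? line ":" 1).getD []).getD 1 "") == "" then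
      (true, st.2)
    else
      (false, st.2)
  else
    (false, st.2 ++ [line])

def add_tags_field_py_alt (yaml_content : String) (tags : List String) : String :=
  let lines := (PySem.Str.split? yaml_content "\n").getD []
  let kept := (lines.foldl pvB_step (false, [])).2
  let cleaned := PySem.Str.join "\n" kept
  let tags_line := "tags: [" ++ PySem.Str.join ", " tags ++ "]"
  if PySem.Str.strip cleaned ≠ "" then cleaned ++ "\n" ++ tags_line
  else tags_line

-- ===== PRECONDITION & SPEC =====
def Spec_add_tags_field_py (yaml_content : String) (tags : List String) (out : String) : Prop := out = add_tags_field_py_alt yaml_content tags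
instance (yaml_content : String) (tags : List String) (out : String) : Decidable (Spec_add_tags_field_py yaml_content tags out) := by unfold Spec_add_tags_field_py; infer_instance

-- ===== CLAIM (what is proved, stated in full; the proofs are below) =====
def Claim_equal_add_tags_field_py : Prop := ∀ (yaml_content : String) (tags : List String), Dom_add_tags_field_py yaml_content tags → Spec_add_tags_field_py yaml_content tags (add_tags_field_py yaml_content tags)

-- ===== LEMMAS AND PROOFS =====

-- a skipped line leaves the skipping state unchanged
theorem pvB_step_item (line : String) (acc : List String)
    (h : (PySem.Str.startswith (PySem.Str.strip line) "- " || PySem.Str.strip line == "") = true) :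
    pvB_step (true, acc) line = (true, acc) := by
  simp only [pvB_step]
  rw [if_pos (by simpa using h)]


-- on a non-item line, skipping mode behaves like normal mode
theorem pvB_step_true_eq_false (line : String) (acc : List String)
    (h : ¬ (PySem.Str.startswith (PySem.Str.strip line) "- " || PySem.Str.strip line == "") = true) :
    pvB_step (true, acc) line = pvB_step (false, acc) line := by
  simp only [pvB_step]
  rw [if_neg (by simpa using h)]
  simp

-- folding in skipping mode from index i = folding in normal mode from the first non-item index
theorem pvB_fold_true (lines : List String) (i : Nat) (acc : List String) :
    ((lines.drop i).foldl pvB_step (true, acc)).2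
      = ((lines.drop (pvA_inner lines i)).foldl pvB_step (false, acc)).2 := by
  induction i using pvA_inner.induct (lines := lines) with
  | case1 i h hc ih =>
      have e : pvA_inner lines i = pvA_inner lines (i + 1) := by
        conv_lhs => rw [pvA_inner]
        rw [dif_pos h, if_pos hc]
      rw [e, ← List.getElem_cons_drop h, List.foldl_cons, pvB_step_item _ _ hc]
      exact ih
  | case2 i h hc =>
      have e : pvA_inner lines i = i := by
        conv_lhs => rw [pvA_inner]
        rw [dif_pos h, if_neg hc]
      rw [e, ← List.getElem_cons_drop h, List.foldl_cons, List.foldl_cons,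
        pvB_step_true_eq_false _ _ hc]
  | case3 i h =>
      have e : pvA_inner lines i = i := by
        conv_lhs => rw [pvA_inner]
        rw [dif_neg h]
      rw [e, List.drop_eq_nil_of_le (by omega)]
      rfl

-- A's outer loop from index i = B's fold over the remaining lines in normal mode
theorem pvAB (lines : List String) (i : Nat) (acc : List String) :
    pvA_outer lines i acc = ((lines.drop i).foldl pvB_step (false, acc)).2 := by
  induction i, acc using pvA_outer.induct (lines := lines) with
  | case1 i acc h line stripped hhdr parts value_part hval ih =>
      have hhdr' : (PySem.Str.startswith (PySem.Str.strip lines[i]) "tags:" || PySem.Str.startswith (PySem.Str.strip lines[i]) "tag:") = true := hhdr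
      have hval' : ((if 1 < ((PySem.Str.splitMax? lines[i] ":" 1).getD []).length then PySem.Str.strip (((PySem.Str.splitMax? lines[i] ":" 1).getD []).getD 1 "") else "") == "") = true := hval
      have hv2 : (PySem.Str.strip (((PySem.Str.splitMax? lines[i] ":" 1).getD []).getD 1 "") == "") = true := by
        by_cases hl : 1 < ((PySem.Str.splitMax? lines[i] ":" 1).getD []).length
        · rw [if_pos hl] at hval'; exact hval'
        · rw [List.getD_eq_default _ _ (by omega)]; decide
      have hstep : pvB_step (false, acc) lines[i] = (true, acc) := by
        simp only [pvB_step]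
        rw [if_neg (by simp), if_pos hhdr', if_pos hv2]
      have hn : pvA_inner lines (i + 1) - 1 + 1 = pvA_inner lines (i + 1) := by
        have := pvA_inner_ge lines (i + 1); omega
      rw [pvA_outer, dif_pos h]
      dsimp only []
      rw [if_pos hhdr', if_pos hval', ih, hn, ← pvB_fold_true lines (i + 1) acc,
        ← List.getElem_cons_drop h, List.foldl_cons, hstep]
  | case2 i acc h line stripped hhdr parts value_part hval ih =>
      have hhdr' : (PySem.Str.startswith (PySem.Str.strip lines[i]) "tags:" || PySem.Str.startswith (PySem.Str.strip lines[i]) "tag:") = true := hhdr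
      have hval' : ¬ ((if 1 < ((PySem.Str.splitMax? lines[i] ":" 1).getD []).length then PySem.Str.strip (((PySem.Str.splitMax? lines[i] ":" 1).getD []).getD 1 "") else "") == "") = true := hval
      have hv2 : (PySem.Str.strip (((PySem.Str.splitMax? lines[i] ":" 1).getD []).getD 1 "") == "") = false := by
        by_cases hl : 1 < ((PySem.Str.splitMax? lines[i] ":" 1).getD []).length
        · rw [if_pos hl] at hval'; simpa using hval'
        · exfalso; apply hval'; rw [if_neg hl]; rfl
      have hstep : pvB_step (false, acc) lines[i] = (false, acc) := by
        simp only [pvB_step]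
        rw [if_neg (by simp), if_pos hhdr', if_neg (by rw [hv2]; simp)]
      rw [pvA_outer, dif_pos h]
      dsimp only []
      rw [if_pos hhdr', if_neg hval', ih, ← List.getElem_cons_drop h, List.foldl_cons, hstep]
  | case3 i acc h line stripped hhdr ih =>
      have hhdr' : ¬ (PySem.Str.startswith (PySem.Str.strip lines[i]) "tags:" || PySem.Str.startswith (PySem.Str.strip lines[i]) "tag:") = true := hhdr
      have hstep : pvB_step (false, acc) lines[i] = (false, acc ++ [lines[i]]) := by
        simp only [pvB_step]
        rw [if_neg (by simp), if_neg hhdr']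
      rw [pvA_outer, dif_pos h]
      dsimp only []
      rw [if_neg hhdr', ih, ← List.getElem_cons_drop h, List.foldl_cons, hstep]
  | case4 i acc h =>
      rw [pvA_outer, dif_neg h, List.drop_eq_nil_of_le (by omega)]
      rfl

-- ===== VERDICT (by name: the statement is the Claim_ definition above) =====
theorem add_tags_field_py_spec : Claim_equal_add_tags_field_py := by
  intro yaml_content tags _
  unfold Spec_add_tags_field_py
  simp only [add_tags_field_py, add_tags_field_py_alt, pvAB, List.drop_zero]
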